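-- pv_equiv track=rewrite | github.com/MatthiasLienhard/isotools | src/isotools/_transcriptome_io.py | aligned_part
-- ===== SOURCE A (Python) =====
-- def aligned_part(cigartuples, is_reverse):
--     "returns the interval of the trasncript that is aligned (e.g. not clipped) according to cigar. Positions are according to transcript strand"
--     start = end = 0
--     for cigar in reversed(cigartuples) if is_reverse else cigartuples:
--         if cigar[0] in (0, 1, 7, 8):  # MI=X -> move forward on read:
--             end += cigar[1]
--         elif cigar[0] in (4, 5):  # clipping at end
--             if end > start:
--                 return (start, end)
--             end += cigar[1]
--             start = end
--     return (start, end)  # clipping at begining or no clipping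
-- ===== SOURCE B (Python) =====
-- def aligned_part(cigartuples, is_reverse):
--     "returns the interval of the trasncript that is aligned (e.g. not clipped) according to cigar. Positions are according to transcript strand"
--     seq = cigartuples[::-1] if is_reverse else cigartuples
--     # phase 1: split the sequence into segments; each clip op (4,5) closes the
--     # current segment, recording (aligned length of segment, clip length).
--     segs = []  # closed segments: (aligned_sum, clip_len)
--     acc = 0    # aligned sum of the still-open trailing segment
--     for cigar in seq:
--         if cigar[0] in (0, 1, 7, 8):
--             acc += cigar[1]
--         elif cigar[0] in (4, 5):
--             segs.append((acc, cigar[1]))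
--             acc = 0
--     # phase 2: scan closed segments; the first one with positive aligned length
--     # is the answer, otherwise everything (including its clip) shifts the base.
--     base = 0
--     for a, c in segs:
--         if a > 0:
--             return (base, base + a)
--         base += a + c
--     return (base, base + acc)
-- ===== Notes on version B (the rewrite author's own statement) =====
-- stated objective: alternative
-- what changed: Replaced the single stateful loop with early return by a two-phase scheme: first split the CIGAR into clip-delimited segments recording each segment's aligned length and clip length, then scan those segments for the first one with positive aligned length.
import Mathlib
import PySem

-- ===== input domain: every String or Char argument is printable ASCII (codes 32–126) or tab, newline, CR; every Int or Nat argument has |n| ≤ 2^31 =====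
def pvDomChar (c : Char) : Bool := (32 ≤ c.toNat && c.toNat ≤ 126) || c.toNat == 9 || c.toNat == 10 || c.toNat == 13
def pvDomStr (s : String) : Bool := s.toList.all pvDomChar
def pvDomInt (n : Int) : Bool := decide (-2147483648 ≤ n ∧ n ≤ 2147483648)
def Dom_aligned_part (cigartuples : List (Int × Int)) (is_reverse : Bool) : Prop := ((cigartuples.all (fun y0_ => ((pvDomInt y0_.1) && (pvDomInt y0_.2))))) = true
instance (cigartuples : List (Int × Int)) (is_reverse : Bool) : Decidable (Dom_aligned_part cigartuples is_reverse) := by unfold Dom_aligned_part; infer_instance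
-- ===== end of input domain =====

-- B rebuilds the answer in two phases (segment the CIGAR at clip ops, then scan the
-- segments) instead of A's single stateful loop; objective: alternative decomposition.

-- ===== PORT A =====
-- A's for-loop with early return, as structural recursion over (start, end)
def alignedLoopA : List (Int × Int) → Int → Int → Int × Int
  | [], start, e => (start, e)
  | c :: rest, start, e =>
    if c.1 = 0 ∨ c.1 = 1 ∨ c.1 = 7 ∨ c.1 = 8 then alignedLoopA rest start (e + c.2)
    else if c.1 = 4 ∨ c.1 = 5 then
      if e > start then (start, e)
      else alignedLoopA rest (e + c.2) (e + c.2)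
    else alignedLoopA rest start e

def aligned_part (cigartuples : List (Int × Int)) (is_reverse : Bool) : Int × Int :=
  alignedLoopA (if is_reverse then cigartuples.reverse else cigartuples) 0 0

-- ===== PORT B =====
-- phase 1 of Source B: split into clip-closed segments (aligned_sum, clip_len); returns
-- (closed segments, aligned sum of the open trailing segment)
def segsOfB : List (Int × Int) → Int → List (Int × Int) × Int
  | [], acc => ([], acc)
  | c :: rest, acc =>
    if c.1 = 0 ∨ c.1 = 1 ∨ c.1 = 7 ∨ c.1 = 8 then segsOfB rest (acc + c.2)
    else if c.1 = 4 ∨ c.1 = 5 then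
      let st := segsOfB rest 0
      ((acc, c.2) :: st.1, st.2)
    else segsOfB rest acc

-- phase 2 of Source B: scan closed segments for the first positive aligned length
def scanSegsB : List (Int × Int) → Int → Int → Int × Int
  | [], base, acc => (base, base + acc)
  | s :: rest, base, acc =>
    if s.1 > 0 then (base, base + s.1) else scanSegsB rest (base + s.1 + s.2) acc

def aligned_part_alt (cigartuples : List (Int × Int)) (is_reverse : Bool) : Int × Int :=
  let seq := if is_reverse then cigartuples.reverse else cigartuples
  let st := segsOfB seq 0
  scanSegsB st.1 0 st.2

-- ===== PRECONDITION & SPEC =====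
def Spec_aligned_part (cigartuples : List (Int × Int)) (is_reverse : Bool) (out : Int × Int) : Prop := out = aligned_part_alt cigartuples is_reverse
instance (cigartuples : List (Int × Int)) (is_reverse : Bool) (out : Int × Int) : Decidable (Spec_aligned_part cigartuples is_reverse out) := by unfold Spec_aligned_part; infer_instance

-- ===== CLAIM (what is proved, stated in full; the proofs are below) =====
def Claim_equal_aligned_part : Prop := ∀ (cigartuples : List (Int × Int)) (is_reverse : Bool), Dom_aligned_part cigartuples is_reverse → Spec_aligned_part cigartuples is_reverse (aligned_part cigartuples is_reverse)

-- ===== LEMMAS AND PROOFS =====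

-- A's loop state (base, base+acc) matches B's segment scan resumed at base with
-- the trailing aligned sum acc of the unprocessed list.
theorem loop_eq_segs (l : List (Int × Int)) : ∀ (acc base : Int),
    alignedLoopA l base (base + acc) =
      scanSegsB (segsOfB l acc).1 base (segsOfB l acc).2 := by
  induction l with
  | nil => intro acc base; simp [alignedLoopA, segsOfB, scanSegsB]
  | cons c rest ih =>
    intro acc base
    by_cases h1 : c.1 = 0 ∨ c.1 = 1 ∨ c.1 = 7 ∨ c.1 = 8
    · simp only [alignedLoopA, segsOfB, if_pos h1]
      rw [show base + acc + c.2 = base + (acc + c.2) by ring]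
      exact ih (acc + c.2) base
    · by_cases h2 : c.1 = 4 ∨ c.1 = 5
      · simp only [alignedLoopA, segsOfB, if_neg h1, if_pos h2, scanSegsB]
        by_cases h3 : base + acc > base
        · rw [if_pos h3, if_pos (by omega : acc > 0)]
        · rw [if_neg h3, if_neg (by omega : ¬ acc > 0)]
          have := ih 0 (base + acc + c.2)
          rw [add_zero] at this
          exact this
      · simp only [alignedLoopA, segsOfB, if_neg h1, if_neg h2]
        exact ih acc base

-- ===== VERDICT (by name: the statement is the Claim_ definition above) =====
theorem aligned_part_spec : Claim_equal_aligned_part := by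
  intro cig rev _
  unfold Spec_aligned_part aligned_part aligned_part_alt
  have := loop_eq_segs (if rev then cig.reverse else cig) 0 0
  simpa using this
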